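/-
  jsmn IS CORRECT ON VALID JSON (token mode).

  parse_layout        for every well-formed layout `l` (= a JSON value with the whitespace of one rendering), whitespace `w1`, `w2` around it,
                      every configuration, every token array of `n ≥ l.count` entries with ANY initial content:
                        jsmn_parse (w1 ++ l.text ++ w2) = l.count, the parser ends at the end of the text with toknext = l.count and
                        toksuper = -1, and the array holds exactly `l.tokens` (offsets, types, sizes; parents with JSMN_PARENT_LINKS,
                        untouched without) followed by its untouched tail
                      — in JSMN_STRICT only if a top-level number / true / false / null is FOLLOWED BY WHITESPACE.
  parse_strict_bare_primitive   the converse for JSMN_STRICT: a top-level number / true / false / null with NOTHING after it — valid JSON by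
                      RFC 8259 — is rejected with JSMN_ERROR_PART (-3), with tokens or in counting mode, the parser left at the primitive.
  parse_valid         the same as parse_layout, from `Prints v text`.
-/
import Json.Jsmn.CorrectValue

namespace Jsmn
open Json

theorem getD_eq_getElem {α : Type} (l : List α) (d : α) {i : Nat} (h : i < l.length) : l.getD i d = l[i] := by
  simp [List.getD, h]

/-- A piece placed at index 0 with no superior token: the array afterwards, as a list. -/
theorem Placed.eq_stamp {cfg : Config} {ts ts' : Tokens} {m : Int} {new : List Token} (h : Placed cfg ts ts' (-1) m 0 new)
    (hlen : new.length ≤ ts.length) : ts' = stamp cfg new ts ++ ts.drop new.length := by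
  have hsl : (stamp cfg new ts).length = new.length := by simp [stamp]; omega
  have hl : (stamp cfg new ts ++ ts.drop new.length).length = ts.length := by simp [hsl]; omega
  apply List.ext_getElem (by rw [hl, h.len])
  intro i h1 h2
  have hit : i < ts.length := by omega
  rw [← getD_eq_getElem _ default h1]
  by_cases hi : i < new.length
  · have := h.new_eq i hi
    simp only [Nat.zero_add] at this
    rw [this, List.getElem_append_left (by omega), getD_eq_getElem _ default hi, getD_eq_getElem _ default hit]
    simp [stamp]
  · rw [h.other i (by omega) (Or.inr (by omega)), List.getElem_append_right (by omega), List.getElem_drop, getD_eq_getElem _ default hit]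
    congr 1; omega

/-- What may follow the top-level value: in strict mode a primitive needs whitespace behind it. -/
theorem stopAfter_top {cfg : Config} {l : Layout} {w2 : List UInt8} (hw2 : IsWs w2)
    (hstrict : cfg.strict = true → l.isPrimitive = true → w2 ≠ []) (hp : l.isPrimitive = true) : StopAfter cfg w2 := by
  cases w2 with
  | nil =>
    refine Or.inl ⟨rfl, ?_⟩
    cases hs : cfg.strict
    · rfl
    · exact absurd rfl (hstrict hs hp)
  | cons c w => exact Or.inr ⟨c, w, rfl, isWsChar_stop cfg (hw2 c (by simp))⟩

/-- **jsmn_parse on a JSON text, with a token array**: the number of tokens, the parser at the end of the text, the expected tokens. -/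
theorem parse_layout (cfg : Config) (w1 : List UInt8) (l : Layout) (w2 : List UInt8) (hw1 : IsWs w1) (hw2 : IsWs w2) (wf : l.WellFormed)
    (hstrict : cfg.strict = true → l.isPrimitive = true → w2 ≠ [])
    (hlen : (w1 ++ l.text ++ w2).length < 2147483648) (n : Nat) (ts0 : Tokens) (h0 : ts0.length = n) (hn : n ≤ 2147483648)
    (hcount : l.count ≤ n) :
    parse cfg (w1 ++ l.text ++ w2) Parser.init (some ts0) n =
      some ((l.count : Int), ⟨(w1 ++ l.text ++ w2).length, l.count, -1⟩,
        some (stamp cfg (l.tokens w1.length 0 (-1)) ts0 ++ ts0.drop l.count)) := by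
  generalize hjs : w1 ++ l.text ++ w2 = js at hlen ⊢
  have hd0 : js.drop 0 = w1 ++ (l.text ++ w2) := by simp [← hjs]
  have T1 := skip_ws (cfg := cfg) (n := n) (by omega) 0 (-1) (some ts0) 0 w1 0 _ hw1 hd0
  have hd1 := drop_advance hd0
  obtain ⟨ts', P, T2⟩ := value_reaches (cfg := cfg) (by omega : js.length < 2147483648) hn l wf (0 + w1.length) 0 (-1) ts0 w2 hd1
    (stopAfter_top hw2 hstrict) h0 (by omega) (by omega) (Or.inl rfl) (Or.inl rfl)
  have hd2 := drop_advance hd1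
  have hsa : supAfter cfg l ts0 0 (-1) = -1 := by unfold supAfter; split <;> rfl
  rw [hsa] at T2
  have T3 := skip_ws (cfg := cfg) (js := js) (n := n) (by omega) (0 + l.count) (-1) (some ts') ((0 + l.count : Nat) : Int) w2
    (0 + w1.length + l.text.length) [] hw2 (by simpa using hd2)
  have hjl : 0 + w1.length + l.text.length + w2.length = js.length := by simp [← hjs]; omega
  rw [hjl] at T3
  simp only [Nat.zero_add] at T1 T2 T3 P
  obtain ⟨fuel', hf, e⟩ := (T1.trans (T2.trans T3)) (js.length + 1) (by simp)
  have hend : loop cfg js n fuel' ⟨⟨js.length, l.count, -1⟩, some ts', (l.count : Int)⟩ =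
      some (finish ⟨⟨js.length, l.count, -1⟩, some ts', (l.count : Int)⟩, ⟨⟨js.length, l.count, -1⟩, some ts', (l.count : Int)⟩) :=
    loop_end (by simp) (Nat.le_refl _) hf
  have hcp := Layout.count_pos l
  have hnew : (l.tokens w1.length 0 (-1)).length = l.count := Layout.tokens_length ..
  have hfin : finish ⟨⟨js.length, l.count, -1⟩, some ts', (l.count : Int)⟩ = (l.count : Int) := by
    have e1 : i32 ((l.count : Int) - 1) = ((l.count - 1 : Nat) : Int) := by rw [i32_of_range (by omega) (by omega)]; omega
    have e2 : (((l.count - 1 : Nat) : Int) + 1).toNat = l.count := by omega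
    have e3 : ¬ (((l.count - 1 : Nat) : Int) < 0) := by omega
    have hnone : scanOpen ts' l.count = none := scanOpen_eq_none l.count (fun i hi => by
      have := P.new_eq i (by omega)
      simp only [Nat.zero_add] at this
      rw [this, stampTok_isOpen]; exact (Layout.tokens_closed l _ _ _).getD i)
    simp only [finish, e1, e2, e3, if_false, hnone]
  have hts : ts' = stamp cfg (l.tokens w1.length 0 (-1)) ts0 ++ ts0.drop l.count := by
    have := P.eq_stamp (by omega)
    rw [hnew] at this; exact this
  have hi0 : i32 (Parser.init.toknext : Int) = 0 := by decide
  simp only [parse, parseFuel, hi0]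
  have e' : loop cfg js n (js.length + 1) ⟨Parser.init, some ts0, 0⟩ = loop cfg js n fuel' ⟨⟨js.length, l.count, -1⟩, some ts', (l.count : Int)⟩ := e
  rw [e', hend, hfin, hts]
  simp

/-- **JSMN_STRICT rejects a top-level number / true / false / null that is not followed by anything**: JSMN_ERROR_PART, in token mode
and in counting mode alike; the parser stays at the primitive, nothing is allocated, the tokens are untouched. (RFC 8259 §2 allows any
value as a JSON text; followed by whitespace the same text is accepted: `parse_layout`.) -/
theorem parse_strict_bare_primitive (cfg : Config) (hs : cfg.strict = true) (w1 : List UInt8) (l : Layout) (hw1 : IsWs w1) (wf : l.WellFormed)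
    (hp : l.isPrimitive = true) (hlen : (w1 ++ l.text).length < 2147483648) (toks : Option Tokens) (n : Nat) :
    parse cfg (w1 ++ l.text) Parser.init toks n = some (JSMN_ERROR_PART, ⟨w1.length, 0, -1⟩, toks) := by
  obtain ⟨c0, t', ht, hc0, hall⟩ : IsPrimText l.text := by
    cases l with
    | null => exact isPrimText_null
    | true => exact isPrimText_true
    | false => exact isPrimText_false
    | number t => exact IsNumber.isPrimText wf
    | _ => simp [Layout.isPrimitive] at hp
  generalize hjs : w1 ++ l.text = js at hlen ⊢
  have hd0 : js.drop 0 = w1 ++ l.text := by simp [← hjs]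
  have T1 := skip_ws (cfg := cfg) (n := n) (by omega) 0 (-1) toks 0 w1 0 _ hw1 hd0
  have hd1 : js.drop (0 + w1.length) = c0 :: t' := by rw [← ht]; exact drop_advance hd0
  have hlt := lt_of_drop hd1
  obtain ⟨fuel', hf, e⟩ := T1 (js.length + 1) (by simp)
  obtain ⟨fuel, rfl⟩ : ∃ f, fuel' = f + 1 := ⟨fuel' - 1, by simp at hf; omega⟩
  have hc : primChar c0 = true := hall c0 (by rw [ht]; simp)
  obtain ⟨h1, h2, h3, h4, h5, h6⟩ := primChar_not_special hc
  have hscan := primScan_eoi cfg js (by omega) (c0 :: t') (fuel + 1) (0 + w1.length) hd1 (by rw [← ht]; exact hall) (by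
    have := congrArg List.length hd1
    simp at this hf ⊢; omega)
  have hi0 : i32 (Parser.init.toknext : Int) = 0 := by decide
  simp only [parse, parseFuel, hi0]
  have e' : loop cfg js n (js.length + 1) ⟨Parser.init, toks, 0⟩ = loop cfg js n (fuel + 1) ⟨⟨0 + w1.length, 0, -1⟩, toks, 0⟩ := e
  rw [e']
  simp only [loop, more_of_drop hd1 (primChar_ne_zero hc), charAt_of_drop hd1, if_true, body, h1, h2, h3, h4, h5, h6, Bool.false_eq_true,
    if_false, hs, hc0, primitiveCase, parsePrimitive, hscan]
  cases toks <;> simp [JSMN_ERROR_PART]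

/-- The text of a JSON text whose value is a number / true / false / null with no whitespace behind it does not end in whitespace. -/
theorem bare_primitive_last {w1 : List UInt8} {l : Layout} (hwf : l.WellFormed) (hp : l.isPrimitive = true) {c : UInt8}
    (hc : (w1 ++ l.text ++ []).getLast? = some c) : isWsChar c = false := by
  obtain ⟨c0, t', ht, _, hall⟩ : IsPrimText l.text := by
    cases l with
    | null => exact isPrimText_null
    | true => exact isPrimText_true
    | false => exact isPrimText_false
    | number t => exact IsNumber.isPrimText hwf
    | _ => simp [Layout.isPrimitive] at hp
  have hlast : c ∈ l.text := by
    have h1 : (w1 ++ l.text ++ []).getLast? = l.text.getLast? := by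
      simp only [List.append_nil, ht, List.getLast?_append, List.getLast?_cons]; rfl
    rw [h1] at hc; exact List.mem_of_getLast? hc
  have := hall c hlast
  simp [primChar, isDigit, isWsChar] at this ⊢
  omega

/-- **jsmn is correct on valid JSON** (token mode), stated with the grammar's relation: if `text` is a JSON text with value `v`
(`Prints`) and `v` is well-formed, then for SOME layout `l` of `v` with `text = w1 ++ l.text ++ w2` — the one `Prints` provides — jsmn_parse
returns `v.count` and leaves exactly that layout's tokens. -/
theorem parse_valid (cfg : Config) (v : Value) (wf : v.WellFormed) (text : List UInt8) (h : Prints v text) (hlen : text.length < 2147483648)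
    (hstrict : cfg.strict = true → v.isPrimitive = true → ∃ c, text.getLast? = some c ∧ isWsChar c = true)
    (n : Nat) (ts0 : Tokens) (h0 : ts0.length = n) (hn : n ≤ 2147483648) (hcount : v.count ≤ n) :
    ∃ (w1 : List UInt8) (l : Layout) (w2 : List UInt8), IsWs w1 ∧ IsWs w2 ∧ l.WellFormed ∧ l.value = v ∧ text = w1 ++ l.text ++ w2 ∧
      parse cfg text Parser.init (some ts0) n =
        some ((v.count : Int), ⟨text.length, v.count, -1⟩, some (stamp cfg (l.tokens w1.length 0 (-1)) ts0 ++ ts0.drop v.count)) := by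
  obtain ⟨w1, l, w2, hw1, hw2, hws, rfl, rfl⟩ := h
  have hwf : l.WellFormed := (Layout.wellFormed_iff l).mpr ⟨hws, wf⟩
  refine ⟨w1, l, w2, hw1, hw2, hwf, rfl, rfl, ?_⟩
  rw [Layout.count_value] at hcount ⊢
  refine parse_layout cfg w1 l w2 hw1 hw2 hwf (fun hs hp hw2e => ?_) hlen n ts0 h0 hn hcount
  subst hw2e
  obtain ⟨c, hc, hcw⟩ := hstrict hs (by rw [Layout.value_isPrimitive]; exact hp)
  rw [bare_primitive_last hwf hp hc] at hcw; exact absurd hcw (by decide)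

end Jsmn
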